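-- pv_equiv track=rewrite | github.com/stephenjhsu/Box | csv2json.py | jsonfunc2
-- ===== SOURCE A (Python) =====
-- def jsonfunc2(data):
-- 	"""
-- 	jsonfunc2 takes in the data and converts it into json format
-- 	"""
-- 	jsonString = '{' + "\n" + '	"headers": [' + "\n"
-- 	header = list(map(chr, range(97, 97+len(data[0]))))
-- 	header2 = ','.join(header)
-- 	for i in range(len(header)-1):
-- 		jsonString += '		"' + header[i] + '"' + ',' + "\n"
-- 	jsonString += '		"' + header[len(header)-1] + '"'
-- 	jsonString += "\n"+ '	],' + "\n"
--
-- 	jsonString += '	"data": [' + "\n"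
-- 	for row in range(len(data)):
-- 		if row != len(data)-1:
-- 			jsonString += "		{" + "\n"
-- 			for j in range(len(header)-1):
-- 				jsonString += '			"'+ header[j] +'": ' + '"' + data[row][j] + '",' + "\n"
-- 			jsonString += '			"'+ header[len(header)-1] +'": ' + '"' + data[row][len(header)-1] + '"'
-- 			jsonString += "\n" + "		}"+ ',' + '\n'
-- 		else:
-- 			jsonString += "		{" + "\n"
-- 			for j in range(len(header)-1):
-- 				jsonString += '			"'+ header[j] +'": ' + '"' + data[row][j] + '",' + "\n"
-- 			jsonString += '			"'+ header[len(header)-1] +'": ' + '"' + data[row][len(header)-1] + '"'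
-- 			jsonString += "\n" + "		}"+ '\n'
--
-- 	jsonString += '	]' + "\n"
-- 	jsonString += '}'
-- 	return jsonString
-- ===== SOURCE B (Python) =====
-- def jsonfunc2(data):
--     """
--     jsonfunc2 takes in the data and converts it into json format
--     """
--     header = [chr(97 + i) for i in range(len(data[0]))]
--     head_block = ',\n'.join('\t\t"%s"' % h for h in header)
--     row_blocks = ',\n'.join(
--         '\t\t{\n'
--         + ',\n'.join('\t\t\t"%s": "%s"' % (h, row[i]) for i, h in enumerate(header))
--         + '\n\t\t}'
--         for row in data)
--     return ('{\n\t"headers": [\n' + head_block + '\n\t],\n'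
--             + '\t"data": [\n' + row_blocks + '\n\t]\n}')
-- ===== Notes on version B (the rewrite author's own statement) =====
-- stated objective: simpler
-- what changed: Replaces A's four explicit accumulation loops with last-element comma special-casing by building the per-header lines and per-row blocks as lists and assembling them with ',\n'.join, so no index arithmetic or trailing-comma branch remains.
import Mathlib
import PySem

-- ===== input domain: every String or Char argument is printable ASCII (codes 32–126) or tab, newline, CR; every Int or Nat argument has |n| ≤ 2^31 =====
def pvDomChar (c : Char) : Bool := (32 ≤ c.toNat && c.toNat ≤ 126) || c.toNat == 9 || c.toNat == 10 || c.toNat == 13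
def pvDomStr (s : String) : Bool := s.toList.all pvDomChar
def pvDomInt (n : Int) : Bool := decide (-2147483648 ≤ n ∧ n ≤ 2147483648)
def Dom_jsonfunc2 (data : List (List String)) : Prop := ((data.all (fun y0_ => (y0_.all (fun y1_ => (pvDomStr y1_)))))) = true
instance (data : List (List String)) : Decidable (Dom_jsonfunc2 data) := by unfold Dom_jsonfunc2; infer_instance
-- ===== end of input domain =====

-- B replaces A's explicit loops with last-element comma branches by ','.join-style assembly
-- (join per-header lines, join per-row blocks); objective: simpler. Equivalence is proved on
-- inputs where A returns (nonempty data, nonempty first row, no row shorter than the first).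

-- ===== PORT A =====
-- literal transliteration of A; works on List Char (PySem.Chars side), String.ofList at the end.
-- (A's local 'header2 = ','.join(header)' is computed by A but never used and has no effect; omitted.)
def jsonfunc2 (data : List (List String)) : String :=
  let s0 : List Char := "{\n\t\"headers\": [\n".toList
  let header : List (List Char) :=
    (PySem.List.pyRange 97 (97 + ((PySem.List.pyGetD data 0 []).length : Int)) 1).map
      (fun i => [Char.ofNat i.toNat])
  let s1 := (PySem.List.pyRange 0 ((header.length : Int) - 1) 1).foldl
    (fun s i => s ++ "\t\t\"".toList ++ PySem.List.pyGetD header i [] ++ "\"".toList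
                  ++ ",".toList ++ "\n".toList) s0
  let s2 := s1 ++ "\t\t\"".toList ++ PySem.List.pyGetD header ((header.length : Int) - 1) []
               ++ "\"".toList
  let s3 := s2 ++ "\n".toList ++ "\t],".toList ++ "\n".toList
  let s4 := s3 ++ "\t\"data\": [".toList ++ "\n".toList
  let s5 := (PySem.List.pyRange 0 ((data.length : Int)) 1).foldl
    (fun s row =>
      if row ≠ (data.length : Int) - 1 then
        let t0 := s ++ "\t\t{".toList ++ "\n".toList
        let t1 := (PySem.List.pyRange 0 ((header.length : Int) - 1) 1).foldl
          (fun t j => t ++ "\t\t\t\"".toList ++ PySem.List.pyGetD header j [] ++ "\": ".toList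
                        ++ "\"".toList
                        ++ (PySem.List.pyGetD (PySem.List.pyGetD data row []) j "").toList
                        ++ "\",".toList ++ "\n".toList) t0
        let t2 := t1 ++ "\t\t\t\"".toList ++ PySem.List.pyGetD header ((header.length : Int) - 1) []
                     ++ "\": ".toList ++ "\"".toList
                     ++ (PySem.List.pyGetD (PySem.List.pyGetD data row [])
                           ((header.length : Int) - 1) "").toList
                     ++ "\"".toList
        t2 ++ "\n".toList ++ "\t\t}".toList ++ ",".toList ++ "\n".toList
      else
        let t0 := s ++ "\t\t{".toList ++ "\n".toList
        let t1 := (PySem.List.pyRange 0 ((header.length : Int) - 1) 1).foldl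
          (fun t j => t ++ "\t\t\t\"".toList ++ PySem.List.pyGetD header j [] ++ "\": ".toList
                        ++ "\"".toList
                        ++ (PySem.List.pyGetD (PySem.List.pyGetD data row []) j "").toList
                        ++ "\",".toList ++ "\n".toList) t0
        let t2 := t1 ++ "\t\t\t\"".toList ++ PySem.List.pyGetD header ((header.length : Int) - 1) []
                     ++ "\": ".toList ++ "\"".toList
                     ++ (PySem.List.pyGetD (PySem.List.pyGetD data row [])
                           ((header.length : Int) - 1) "").toList
                     ++ "\"".toList
        t2 ++ "\n".toList ++ "\t\t}".toList ++ "\n".toList) s4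
  let s6 := s5 ++ "\t]".toList ++ "\n".toList
  String.ofList (s6 ++ "}".toList)

-- ===== PORT B =====
-- literal transliteration of Source B: comprehensions + ',\n'.join (PySem.Chars.join).
def jsonfunc2_alt (data : List (List String)) : String :=
  let header : List (List Char) :=
    (List.range (PySem.List.pyGetD data 0 []).length).map (fun i => [Char.ofNat (97 + i)])
  let headBlock := PySem.Chars.join ",\n".toList
    (header.map (fun h => "\t\t\"".toList ++ h ++ "\"".toList))
  let rowBlocks := PySem.Chars.join ",\n".toList
    (data.map (fun row =>
      "\t\t{\n".toList
      ++ PySem.Chars.join ",\n".toList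
          ((PySem.List.enumerate header).map (fun p =>
            "\t\t\t\"".toList ++ p.2 ++ "\": \"".toList
              ++ (PySem.List.pyGetD row p.1 "").toList ++ "\"".toList))
      ++ "\n\t\t}".toList))
  String.ofList ("{\n\t\"headers\": [\n".toList ++ headBlock ++ "\n\t],\n".toList
             ++ "\t\"data\": [\n".toList ++ rowBlocks ++ "\n\t]\n}".toList)

-- ===== PRECONDITION & SPEC =====
-- Pre_ excludes exactly the inputs where A raises IndexError: empty data, an empty first row
-- (header[-1] on an empty header), or some row shorter than the first row (data[row][j]).
def Pre_jsonfunc2 (data : List (List String)) : Prop :=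
  data ≠ [] ∧ data.headD [] ≠ [] ∧ ∀ row ∈ data, (data.headD []).length ≤ row.length
instance (data : List (List String)) : Decidable (Pre_jsonfunc2 data) := by
  unfold Pre_jsonfunc2; infer_instance
def pvWitness_jsonfunc2 : List (List String) := [["x", "y"], ["u", "v"], ["1", " 2"]]

def Spec_jsonfunc2 (data : List (List String)) (out : String) : Prop := out = jsonfunc2_alt data
instance (data : List (List String)) (out : String) : Decidable (Spec_jsonfunc2 data out) := by
  unfold Spec_jsonfunc2; infer_instance

-- ===== CLAIM (what is proved, stated in full; the proofs are below) =====
def Claim_equal_jsonfunc2 : Prop := ∀ (data : List (List String)),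
  Dom_jsonfunc2 data → Pre_jsonfunc2 data → Spec_jsonfunc2 data (jsonfunc2 data)
-- ===== LEMMAS AND PROOFS =====

theorem foldl_sep_join {α : Type} (g : α → List Char) (sep : List Char) :
    ∀ (xs : List α) (x : α) (acc : List Char),
      (xs.foldl (fun s y => s ++ (g y ++ sep)) acc) ++ g x
        = acc ++ PySem.Chars.join sep ((xs ++ [x]).map g) := by
  intro xs
  induction xs with
  | nil => intro x acc; simp [PySem.Chars.join_singleton]
  | cons y t ih =>
    intro x acc
    simp only [List.foldl_cons, List.cons_append, List.map_cons]
    rw [ih]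
    cases t with
    | nil => simp [PySem.Chars.join_cons_cons, PySem.Chars.join_singleton]
    | cons a t' => simp [PySem.Chars.join_cons_cons]

-- index-loop form of foldl_sep_join, as A writes it: range(n-1) with separators, then a last step.
theorem loop_sep_join (F : Int → List Char) (sep : List Char) (n : Nat) (hn : 0 < n) :
    ∀ (acc : List Char),
      ((PySem.List.pyRange 0 ((n : Int) - 1) 1).foldl (fun s i => s ++ (F i ++ sep)) acc)
          ++ F ((n : Int) - 1)
        = acc ++ PySem.Chars.join sep ((PySem.List.pyRange 0 (n : Int) 1).map F) := by
  intro acc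
  have h1 : PySem.List.pyRange 0 (n : Int) 1
      = PySem.List.pyRange 0 ((n : Int) - 1) 1 ++ [(n : Int) - 1] := by
    calc PySem.List.pyRange 0 (n : Int) 1
        = PySem.List.pyRange 0 (((n : Int) - 1) + 1) 1 := by norm_num
      _ = PySem.List.pyRange 0 ((n : Int) - 1) 1 ++ [(n : Int) - 1] :=
          PySem.List.pyRange_one_succ_right (by omega)
  rw [h1]
  exact foldl_sep_join F sep _ _ acc

-- mapping G over indexed reads of xs along range(len(xs)) is mapping G over xs.
theorem map_get_range {α β : Type} (xs : List α) (d : α) (G : α → β) :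
    (PySem.List.pyRange 0 ((xs.length : Int)) 1).map (fun j => G (PySem.List.pyGetD xs j d))
      = xs.map G := by
  have h := PySem.List.map_pyGetD_pyRange_zero xs d
  calc (PySem.List.pyRange 0 ((xs.length : Int)) 1).map (fun j => G (PySem.List.pyGetD xs j d))
      = ((PySem.List.pyRange 0 ((xs.length : Int)) 1).map
          (fun j => PySem.List.pyGetD xs j d)).map G := by
        simp [List.map_map, Function.comp]
    _ = xs.map G := by
        rw [show ((xs.length : Int)) = PySem.List.len xs by simp [PySem.List.len_eq], h]

-- the canonical shared shape of both outputs
def hB (n : Nat) : List (List Char) :=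
  (List.range n).map (fun i => [Char.ofNat (97 + i)])

def hline (h : List Char) : List Char := "\t\t\"".toList ++ h ++ "\"".toList

def rowBlk (n : Nat) (r : List String) : List Char :=
  "\t\t{\n".toList
  ++ PySem.Chars.join ",\n".toList
      ((PySem.List.pyRange 0 (n : Int) 1).map (fun j =>
        "\t\t\t\"".toList ++ PySem.List.pyGetD (hB n) j [] ++ "\": \"".toList
          ++ (PySem.List.pyGetD r j "").toList ++ "\"".toList))
  ++ "\n\t\t}".toList

def canon (n : Nat) (data : List (List String)) : List Char :=
  "{\n\t\"headers\": [\n".toList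
  ++ PySem.Chars.join ",\n".toList ((hB n).map hline)
  ++ "\n\t],\n".toList ++ "\t\"data\": [\n".toList
  ++ PySem.Chars.join ",\n".toList (data.map (rowBlk n))
  ++ "\n\t]\n}".toList

theorem lemB (d0 : List String) (rest : List (List String)) :
    jsonfunc2_alt (d0 :: rest) = String.ofList (canon d0.length (d0 :: rest)) := by
  simp only [jsonfunc2_alt, canon]
  congr 1
  rw [show PySem.List.pyGetD (d0 :: rest) 0 [] = d0 by simp [pysem]]
  rw [show (List.range d0.length).map (fun i => [Char.ofNat (97 + i)]) = hB d0.length from rfl]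
  rw [PySem.List.enumerate_eq_map_pyRange (hB d0.length) []]
  rw [show PySem.List.len (hB d0.length) = ((d0.length : Int)) by simp [PySem.List.len_eq, hB]]
  simp only [List.map_map]
  rfl


theorem headLoop (H : List (List Char)) (n : Nat) (hn : 0 < n) (acc : List Char) :
    (PySem.List.pyRange 0 ((n : Int) - 1) 1).foldl
        (fun s i => s ++ "\t\t\"".toList ++ PySem.List.pyGetD H i [] ++ "\"".toList
                      ++ ",".toList ++ "\n".toList) acc
      ++ "\t\t\"".toList ++ PySem.List.pyGetD H ((n : Int) - 1) [] ++ "\"".toList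
    = acc ++ PySem.Chars.join ",\n".toList
        ((PySem.List.pyRange 0 (n : Int) 1).map (fun j => hline (PySem.List.pyGetD H j []))) := by
  have h1 : (fun (s : List Char) (i : Int) =>
        s ++ "\t\t\"".toList ++ PySem.List.pyGetD H i [] ++ "\"".toList ++ ",".toList ++ "\n".toList)
      = (fun s i => s ++ ((fun j => hline (PySem.List.pyGetD H j [])) i ++ ",\n".toList)) := by
    funext s i; simp [hline]
  rw [h1]
  have e := loop_sep_join (fun j => hline (PySem.List.pyGetD H j [])) ",\n".toList n hn acc
  rw [← e]; simp [hline]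

theorem rowLoop (H : List (List Char)) (n : Nat) (hn : 0 < n) (r : List String) (acc : List Char) :
    (PySem.List.pyRange 0 ((n : Int) - 1) 1).foldl
        (fun t j => t ++ "\t\t\t\"".toList ++ PySem.List.pyGetD H j [] ++ "\": ".toList
                      ++ "\"".toList ++ (PySem.List.pyGetD r j "").toList
                      ++ "\",".toList ++ "\n".toList) acc
      ++ "\t\t\t\"".toList ++ PySem.List.pyGetD H ((n : Int) - 1) [] ++ "\": ".toList
      ++ "\"".toList ++ (PySem.List.pyGetD r ((n : Int) - 1) "").toList ++ "\"".toList
    = acc ++ PySem.Chars.join ",\n".toList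
        ((PySem.List.pyRange 0 (n : Int) 1).map (fun j =>
          "\t\t\t\"".toList ++ PySem.List.pyGetD H j [] ++ "\": \"".toList
            ++ (PySem.List.pyGetD r j "").toList ++ "\"".toList)) := by
  have h1 : (fun (t : List Char) (j : Int) =>
        t ++ "\t\t\t\"".toList ++ PySem.List.pyGetD H j [] ++ "\": ".toList
          ++ "\"".toList ++ (PySem.List.pyGetD r j "").toList ++ "\",".toList ++ "\n".toList)
      = (fun t j => t ++ ((fun j => "\t\t\t\"".toList ++ PySem.List.pyGetD H j [] ++ "\": \"".toList
            ++ (PySem.List.pyGetD r j "").toList ++ "\"".toList) j ++ ",\n".toList)) := by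
    funext t j; simp
  rw [h1]
  have e := loop_sep_join (fun j => "\t\t\t\"".toList ++ PySem.List.pyGetD H j [] ++ "\": \"".toList
      ++ (PySem.List.pyGetD r j "").toList ++ "\"".toList) ",\n".toList n hn acc
  rw [← e]; simp

theorem dataLoop (B : Int → List Char) (m : Nat) (hm : 0 < m) (acc : List Char) :
    (PySem.List.pyRange 0 (m : Int) 1).foldl
        (fun s row => if row ≠ (m : Int) - 1
          then s ++ (B row ++ [',', '\n'])
          else s ++ (B row ++ ['\n'])) acc
    = acc ++ PySem.Chars.join [',', '\n'] ((PySem.List.pyRange 0 (m : Int) 1).map B) ++ ['\n'] := by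
  have h1 : PySem.List.pyRange 0 (m : Int) 1
      = PySem.List.pyRange 0 ((m : Int) - 1) 1 ++ [(m : Int) - 1] := by
    calc PySem.List.pyRange 0 (m : Int) 1
        = PySem.List.pyRange 0 (((m : Int) - 1) + 1) 1 := by norm_num
      _ = _ := PySem.List.pyRange_one_succ_right (by omega)
  rw [h1, List.foldl_append]
  have hc : ∀ (a : List Char), ∀ x ∈ PySem.List.pyRange 0 ((m : Int) - 1) 1,
      (if x ≠ (m : Int) - 1 then a ++ (B x ++ [',', '\n']) else a ++ (B x ++ ['\n']))
        = a ++ (B x ++ [',', '\n']) := by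
    intro a x hx
    have hx' := PySem.List.mem_pyRange_one.1 hx
    rw [if_pos (by omega)]
  rw [PySem.List.foldl_congr_mem _ _ _ _ hc]
  simp only [List.foldl_cons, List.foldl_nil]
  rw [if_neg (by simp)]
  rw [← List.append_assoc, foldl_sep_join B [',', '\n'] _ _ acc, List.append_assoc]

theorem lemA (d0 : List String) (rest : List (List String)) (hd0 : d0 ≠ []) :
    jsonfunc2 (d0 :: rest) = String.ofList (canon d0.length (d0 :: rest)) := by
  have hn : 0 < d0.length := List.length_pos_of_ne_nil hd0
  simp only [jsonfunc2, canon]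
  congr 1
  rw [show PySem.List.pyGetD (d0 :: rest) 0 [] = d0 by simp [pysem]]
  rw [show (PySem.List.pyRange 97 (97 + (d0.length : Int)) 1).map (fun i => [Char.ofNat i.toNat])
        = hB d0.length by
    rw [PySem.List.pyRange_one]
    simp only [List.map_map, hB]
    have h2 : (97 + (d0.length : Int) - 97).toNat = d0.length := by omega
    rw [h2]
    apply List.map_congr_left
    intro k hk
    simp only [Function.comp]
    have h3 : ((97 : Int) + (k : Int)).toNat = 97 + k := by omega
    rw [h3]]
  rw [show ((hB d0.length).length : Int) = (d0.length : Int) by simp [hB]]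
  simp only [headLoop (hB d0.length) d0.length hn, rowLoop (hB d0.length) d0.length hn]
  rw [show (fun (s : List Char) (row : Int) =>
        if row ≠ ((d0 :: rest).length : Int) - 1 then
          (s ++ "\t\t{".toList ++ "\n".toList)
            ++ PySem.Chars.join ",\n".toList
                ((PySem.List.pyRange 0 (d0.length : Int) 1).map (fun j =>
                  "\t\t\t\"".toList ++ PySem.List.pyGetD (hB d0.length) j [] ++ "\": \"".toList
                    ++ (PySem.List.pyGetD (PySem.List.pyGetD (d0 :: rest) row []) j "").toList
                    ++ "\"".toList))
            ++ "\n".toList ++ "\t\t}".toList ++ ",".toList ++ "\n".toList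
        else
          (s ++ "\t\t{".toList ++ "\n".toList)
            ++ PySem.Chars.join ",\n".toList
                ((PySem.List.pyRange 0 (d0.length : Int) 1).map (fun j =>
                  "\t\t\t\"".toList ++ PySem.List.pyGetD (hB d0.length) j [] ++ "\": \"".toList
                    ++ (PySem.List.pyGetD (PySem.List.pyGetD (d0 :: rest) row []) j "").toList
                    ++ "\"".toList))
            ++ "\n".toList ++ "\t\t}".toList ++ "\n".toList)
      = (fun s row => if row ≠ ((d0 :: rest).length : Int) - 1
          then s ++ ((fun row => rowBlk d0.length (PySem.List.pyGetD (d0 :: rest) row [])) row ++ [',', '\n'])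
          else s ++ ((fun row => rowBlk d0.length (PySem.List.pyGetD (d0 :: rest) row [])) row ++ ['\n'])) by
    funext s row
    by_cases h : row ≠ ((d0 :: rest).length : Int) - 1 <;> simp [rowBlk]]
  rw [dataLoop (fun row => rowBlk d0.length (PySem.List.pyGetD (d0 :: rest) row []))
        (d0 :: rest).length (by simp)]
  rw [map_get_range (d0 :: rest) [] (rowBlk d0.length)]
  rw [show ((d0.length : Int)) = (((hB d0.length).length : Int)) from by simp [hB]]
  rw [map_get_range (hB d0.length) [] hline]
  simp

-- ===== VERDICT (by name: the statement is the Claim_ definition above) =====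
theorem jsonfunc2_spec : Claim_equal_jsonfunc2 := by
  intro data _hdom hpre
  obtain ⟨hne, hd0, _hrows⟩ := hpre
  obtain ⟨d0, rest, rfl⟩ := List.exists_cons_of_ne_nil hne
  simp only [List.headD_cons] at hd0
  unfold Spec_jsonfunc2
  rw [lemA d0 rest hd0, lemB]
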